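-- pv_equiv track=rewrite | github.com/niilohlin/leetcode | anagram_indexes.py | dict_equal
-- ===== SOURCE A (Python) =====
-- def dict_equal(d1, d2):
--     for k, v in d1.items():
--         if d2.get(k, 0) != v:
--             return False
--     for k, v in d2.items():
--         if d1.get(k, 0) != v:
--             return False
--     return True
-- ===== SOURCE B (Python) =====
-- def dict_equal(d1, d2):
--     def canon(d):
--         return sorted(((k, v) for k, v in d.items() if v != 0), key=lambda kv: kv[0])
--     return canon(d1) == canon(d2)
-- ===== Notes on version B (the rewrite author's own statement) =====
-- stated objective: alternative
-- what changed: Instead of A's two cross-lookup scans, B reduces each dict to a canonical form (drop zero-valued entries, sort the remaining items by key) and compares the two canonical lists for structural equality, with no get()/lookup at all.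
import Mathlib
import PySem

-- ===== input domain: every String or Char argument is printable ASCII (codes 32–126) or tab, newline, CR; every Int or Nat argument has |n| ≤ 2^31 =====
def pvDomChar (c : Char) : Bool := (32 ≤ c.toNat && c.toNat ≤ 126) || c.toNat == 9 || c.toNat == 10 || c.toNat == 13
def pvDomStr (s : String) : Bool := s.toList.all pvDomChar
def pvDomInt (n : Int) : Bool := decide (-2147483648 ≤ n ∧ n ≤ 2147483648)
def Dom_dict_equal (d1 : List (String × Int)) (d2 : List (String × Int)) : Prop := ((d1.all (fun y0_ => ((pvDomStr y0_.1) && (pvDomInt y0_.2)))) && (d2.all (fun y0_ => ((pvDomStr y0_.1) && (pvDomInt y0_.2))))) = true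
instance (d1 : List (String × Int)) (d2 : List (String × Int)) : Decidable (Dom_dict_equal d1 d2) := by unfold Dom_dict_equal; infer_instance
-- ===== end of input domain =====

-- B compares canonical forms (zero-valued entries dropped, remaining items sorted by key) instead of A's two cross-lookup scans (objective: alternative).


-- ===== PORT A =====
-- d.get(k, 0) on the association list (first match; keys are unique under Pre_)
def pvGetD0 (d : List (String × Int)) (k : String) : Int :=
  match d with
  | [] => 0
  | (k', v) :: rest => if k' = k then v else pvGetD0 rest k

-- one 'for k, v in iter.items(): if other.get(k, 0) != v: return False' loop
def pvLoopA (other : List (String × Int)) : List (String × Int) → Bool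
  | [] => true
  | (k, v) :: rest => if pvGetD0 other k ≠ v then false else pvLoopA other rest

def dict_equal (d1 : List (String × Int)) (d2 : List (String × Int)) : Bool :=
  pvLoopA d2 d1 && pvLoopA d1 d2

-- ===== PORT B =====
-- canon(d): the items with nonzero value, sorted by key (Source B sorts with key=lambda kv: kv[0])
def pvCanon (d : List (String × Int)) : List (String × Int) :=
  PySem.List.sorted (d.filter (fun kv => kv.2 ≠ 0)) (fun kv => kv.1) false

def dict_equal_alt (d1 : List (String × Int)) (d2 : List (String × Int)) : Bool :=
  pvCanon d1 == pvCanon d2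

-- ===== PRECONDITION & SPEC =====
-- Python's d1, d2 are dicts, whose keys are necessarily unique; association lists with
-- duplicate keys correspond to no dict input, so Pre_ restricts to unique keys on each side.
def Pre_dict_equal (d1 : List (String × Int)) (d2 : List (String × Int)) : Prop :=
  (d1.map Prod.fst).Nodup ∧ (d2.map Prod.fst).Nodup
instance (d1 : List (String × Int)) (d2 : List (String × Int)) : Decidable (Pre_dict_equal d1 d2) := by unfold Pre_dict_equal; infer_instance

def pvWitness_dict_equal : (List (String × Int)) × (List (String × Int)) :=
  ([("a", 1), ("b", 2)], [("a", 1)])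

def Spec_dict_equal (d1 : List (String × Int)) (d2 : List (String × Int)) (out : Bool) : Prop := out = dict_equal_alt d1 d2
instance (d1 : List (String × Int)) (d2 : List (String × Int)) (out : Bool) : Decidable (Spec_dict_equal d1 d2 out) := by unfold Spec_dict_equal; infer_instance

-- ===== CLAIM (what is proved, stated in full; the proofs are below) =====
def Claim_equal_dict_equal : Prop := ∀ (d1 : List (String × Int)) (d2 : List (String × Int)), Dom_dict_equal d1 d2 → Pre_dict_equal d1 d2 → Spec_dict_equal d1 d2 (dict_equal d1 d2)

-- ===== LEMMAS AND PROOFS =====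

lemma pvLoopA_iff (other l : List (String × Int)) :
    pvLoopA other l = true ↔ ∀ p ∈ l, pvGetD0 other p.1 = p.2 := by
  induction l with
  | nil => simp [pvLoopA]
  | cons hd tl ih =>
    obtain ⟨k, v⟩ := hd
    simp only [pvLoopA]
    split_ifs with h
    · simp only [false_iff]
      intro hall
      exact h (hall (k, v) (List.mem_cons_self ..))
    · push Not at h
      rw [ih]
      constructor
      · rintro hall p hp
        rcases List.mem_cons.mp hp with rfl | hp
        · exact h
        · exact hall p hp
      · intro hall p hp
        exact hall p (List.mem_cons_of_mem _ hp)

lemma pvGetD0_of_mem {d : List (String × Int)} {k : String} {v : Int}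
    (hnd : (d.map Prod.fst).Nodup) (hm : (k, v) ∈ d) : pvGetD0 d k = v := by
  induction d with
  | nil => simp at hm
  | cons hd tl ih =>
    obtain ⟨k', v'⟩ := hd
    simp only [List.map_cons, List.nodup_cons] at hnd
    simp only [pvGetD0]
    rcases List.mem_cons.mp hm with heq | hm'
    · simp_all
    · split_ifs with h
      · exfalso
        subst h
        exact hnd.1 (List.mem_map.mpr ⟨(k', v), hm', rfl⟩)
      · exact ih hnd.2 hm'

lemma pvGetD0_eq_zero_of_not_mem {d : List (String × Int)} {k : String}
    (h : k ∉ d.map Prod.fst) : pvGetD0 d k = 0 := by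
  induction d with
  | nil => rfl
  | cons hd tl ih =>
    obtain ⟨k', v'⟩ := hd
    simp only [List.map_cons, List.mem_cons] at h
    push Not at h
    simp only [pvGetD0]
    rw [if_neg (fun hh => h.1 hh.symm), ih h.2]

lemma mem_of_pvGetD0_ne_zero {d : List (String × Int)} {k : String}
    (h : pvGetD0 d k ≠ 0) : (k, pvGetD0 d k) ∈ d := by
  induction d with
  | nil => exact absurd rfl h
  | cons hd tl ih =>
    obtain ⟨k', v'⟩ := hd
    by_cases hk : k' = k
    · subst hk
      simp only [pvGetD0, if_pos]
      exact List.mem_cons_self ..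
    · simp only [pvGetD0, if_neg hk] at h ⊢
      exact List.mem_cons_of_mem _ (ih h)

-- membership in the nonzero filter, under unique keys
lemma mem_filter_iff_pvGetD0 {d : List (String × Int)} {k : String} {v : Int}
    (hnd : (d.map Prod.fst).Nodup) :
    (k, v) ∈ d.filter (fun kv => kv.2 ≠ 0) ↔ pvGetD0 d k = v ∧ v ≠ 0 := by
  rw [List.mem_filter]
  constructor
  · rintro ⟨hm, hv⟩
    simp only [decide_eq_true_eq] at hv
    exact ⟨pvGetD0_of_mem hnd hm, hv⟩
  · rintro ⟨hg, hv⟩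
    refine ⟨?_, by simpa using hv⟩
    have := mem_of_pvGetD0_ne_zero (d := d) (k := k) (hg ▸ hv)
    rwa [hg] at this

lemma nodup_filter_keys {d : List (String × Int)}
    (hnd : (d.map Prod.fst).Nodup) :
    ((d.filter (fun kv => kv.2 ≠ 0)).map Prod.fst).Nodup :=
  List.Sublist.nodup (List.Sublist.map Prod.fst List.filter_sublist) hnd

lemma nodup_of_nodup_keys {d : List (String × Int)}
    (hnd : (d.map Prod.fst).Nodup) : d.Nodup :=
  List.Nodup.of_map Prod.fst hnd

-- lookup in the canonical form agrees with lookup in the dict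
lemma pvGetD0_pvCanon {d : List (String × Int)} (hnd : (d.map Prod.fst).Nodup) (k : String) :
    pvGetD0 (pvCanon d) k = pvGetD0 d k := by
  have hperm : (pvCanon d).Perm (d.filter (fun kv => kv.2 ≠ 0)) :=
    PySem.List.sorted_perm ..
  have hcnd : ((pvCanon d).map Prod.fst).Nodup :=
    ((hperm.map Prod.fst).nodup_iff).mpr (nodup_filter_keys hnd)
  by_cases h0 : pvGetD0 d k = 0
  · rw [h0]
    apply pvGetD0_eq_zero_of_not_mem
    intro hk
    rcases List.mem_map.mp hk with ⟨⟨k', v⟩, hm, hfst⟩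
    cases hfst
    have := (mem_filter_iff_pvGetD0 hnd).mp (hperm.mem_iff.mp hm)
    exact this.2 (this.1 ▸ h0 ▸ rfl)
  · have hm : (k, pvGetD0 d k) ∈ pvCanon d :=
      hperm.mem_iff.mpr ((mem_filter_iff_pvGetD0 hnd).mpr ⟨rfl, h0⟩)
    exact pvGetD0_of_mem hcnd hm

-- a sorted-by-key canonical form is strictly increasing in the key when keys are unique
lemma pvCanon_pairwise_lt {d : List (String × Int)} (hnd : (d.map Prod.fst).Nodup) :
    (pvCanon d).Pairwise (fun a b => a.1 < b.1) := by
  have hle : (pvCanon d).Pairwise (fun a b => a.1 ≤ b.1) :=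
    PySem.List.sorted_pairwise ..
  have hperm : (pvCanon d).Perm (d.filter (fun kv => kv.2 ≠ 0)) :=
    PySem.List.sorted_perm ..
  have hcnd : ((pvCanon d).map Prod.fst).Nodup :=
    ((hperm.map Prod.fst).nodup_iff).mpr (nodup_filter_keys hnd)
  have hne : (pvCanon d).Pairwise (fun a b => a.1 ≠ b.1) := by
    unfold List.Nodup at hcnd
    rwa [List.pairwise_map] at hcnd
  exact (hle.and hne).imp (fun h => lt_of_le_of_ne h.1 h.2)

-- equality of canonical forms characterises pointwise-equal lookups
lemma pvCanon_eq_iff {d1 d2 : List (String × Int)}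
    (h1 : (d1.map Prod.fst).Nodup) (h2 : (d2.map Prod.fst).Nodup) :
    pvCanon d1 = pvCanon d2 ↔ ∀ k, pvGetD0 d1 k = pvGetD0 d2 k := by
  constructor
  · intro heq k
    rw [← pvGetD0_pvCanon h1 k, heq, pvGetD0_pvCanon h2 k]
  · intro hall
    have hp1 : (pvCanon d1).Perm (d1.filter (fun kv => kv.2 ≠ 0)) :=
      PySem.List.sorted_perm ..
    have hp2 : (pvCanon d2).Perm (d2.filter (fun kv => kv.2 ≠ 0)) :=
      PySem.List.sorted_perm ..
    have hf : (d1.filter (fun kv => kv.2 ≠ 0)).Perm (d2.filter (fun kv => kv.2 ≠ 0)) := by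
      rw [List.perm_ext_iff_of_nodup
        (nodup_of_nodup_keys (nodup_filter_keys h1))
        (nodup_of_nodup_keys (nodup_filter_keys h2))]
      rintro ⟨k, v⟩
      rw [mem_filter_iff_pvGetD0 h1, mem_filter_iff_pvGetD0 h2, hall k]
    exact (PySem.List.sorted_eq_of_perm_of_pairwise_lt _ _ _
      (hp1.trans hf) (pvCanon_pairwise_lt h1)).symm

-- A's two loops succeed exactly when the zero-defaulted lookups agree everywhere
lemma dict_equal_iff {d1 d2 : List (String × Int)}
    (h1 : (d1.map Prod.fst).Nodup) (h2 : (d2.map Prod.fst).Nodup) :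
    dict_equal d1 d2 = true ↔ ∀ k, pvGetD0 d1 k = pvGetD0 d2 k := by
  unfold dict_equal
  rw [Bool.and_eq_true, pvLoopA_iff, pvLoopA_iff]
  constructor
  · rintro ⟨h12, h21⟩ k
    by_cases hk1 : k ∈ d1.map Prod.fst
    · rcases List.mem_map.mp hk1 with ⟨⟨k', v⟩, hm, hfst⟩
      cases hfst
      rw [pvGetD0_of_mem h1 hm, h12 (k', v) hm]
    · by_cases hk2 : k ∈ d2.map Prod.fst
      · rcases List.mem_map.mp hk2 with ⟨⟨k', v⟩, hm, hfst⟩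
        cases hfst
        rw [pvGetD0_of_mem h2 hm, h21 (k', v) hm]
      · rw [pvGetD0_eq_zero_of_not_mem hk1, pvGetD0_eq_zero_of_not_mem hk2]
  · intro hall
    constructor
    · rintro ⟨k, v⟩ hm
      rw [← hall k, pvGetD0_of_mem h1 hm]
    · rintro ⟨k, v⟩ hm
      rw [hall k, pvGetD0_of_mem h2 hm]

-- ===== VERDICT (by name: the statement is the Claim_ definition above) =====
theorem dict_equal_spec : Claim_equal_dict_equal := by
  intro d1 d2 _ hpre
  unfold Spec_dict_equal dict_equal_alt
  rw [Bool.eq_iff_iff, beq_iff_eq, dict_equal_iff hpre.1 hpre.2, pvCanon_eq_iff hpre.1 hpre.2]
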